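-- pv_equiv track=rewrite | github.com/Jing0715-fer/protein_evaluator | src/template_manager.py | _determine_dominant_method
-- ===== SOURCE A (Python) =====
-- from typing import Optional, List, Dict, Any
--
-- METHOD_MAPPING = {
--     'x-ray': 'xray',
--     'xray': 'xray',
--     'x-ray crystallography': 'xray',
--     'cryo-em': 'cryoem',
--     'cryoem': 'cryoem',
--     'electron cryomicroscopy': 'cryoem',
--     'nmr': 'nmr',
--     'nuclear magnetic resonance': 'nmr',
--     'alphafold': 'alphafold',
--     'alphafold2': 'alphafold',
--     'af2': 'alphafold',
--     'model': 'alphafold',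
--     ' homology': 'alphafold',  # AlphaFold Homology
-- }
--
-- def normalize_method(method: str) -> str:
--     """Normalize experimental method name to standard key."""
--     if not method:
--         return 'default'
--     method_lower = method.lower().strip()
--     return METHOD_MAPPING.get(method_lower, 'default')
--
-- def _determine_dominant_method(pdb_data: Dict) -> str:
--     """
--     Determine the dominant experimental method from PDB data.
--
--     Args:
--         pdb_data: PDB data dict with 'structures' list
--
--     Returns:
--         Method key (xray, cryoem, nmr, alphafold, default)
--     """
--     from collections import Counter
--
--     structures = pdb_data.get('structures', [])
--     if not structures:
--         return 'default'
--
--     methods = []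
--     for struct in structures:
--         method = struct.get('experimental_method', '')
--         if method:
--             methods.append(normalize_method(method))
--
--     if not methods:
--         return 'default'
--
--     # Count method occurrences and return most common
--     method_counts = Counter(methods)
--
--     # Priority order for ties: xray > cryoem > nmr > alphafold > default
--     priority_order = ['xray', 'cryoem', 'nmr', 'alphafold', 'default']
--
--     most_common = method_counts.most_common(1)[0][0] if method_counts else 'default'
--
--     # If there's a tie, use priority order
--     max_count = method_counts[most_common]
--     tied_methods = [m for m, c in method_counts.items() if c == max_count]
--
--     for p in priority_order:
--         if p in tied_methods:
--             return p
--
--     return most_common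
-- ===== SOURCE B (Python) =====
-- METHOD_MAPPING = {
--     'x-ray': 'xray',
--     'xray': 'xray',
--     'x-ray crystallography': 'xray',
--     'cryo-em': 'cryoem',
--     'cryoem': 'cryoem',
--     'electron cryomicroscopy': 'cryoem',
--     'nmr': 'nmr',
--     'nuclear magnetic resonance': 'nmr',
--     'alphafold': 'alphafold',
--     'alphafold2': 'alphafold',
--     'af2': 'alphafold',
--     'model': 'alphafold',
--     ' homology': 'alphafold',
-- }
--
-- def normalize_method(method: str) -> str:
--     if not method:
--         return 'default'
--     return METHOD_MAPPING.get(method.lower().strip(), 'default')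
--
-- PRIORITY = {'xray': 0, 'cryoem': 1, 'nmr': 2, 'alphafold': 3, 'default': 4}
--
-- def _determine_dominant_method(pdb_data):
--     structures = pdb_data.get('structures', [])
--     if not structures:
--         return 'default'
--
--     # Online argmax: one streaming pass keeps running counts and the current
--     # winner; a newly incremented key takes over only if its (count, -priority)
--     # pair strictly beats the holder's, so ties resolve toward higher priority.
--     counts = {}
--     best = None
--     for struct in structures:
--         raw = struct.get('experimental_method', '')
--         if not raw:
--             continue
--         k = normalize_method(raw)
--         counts[k] = counts.get(k, 0) + 1
--         if best is None or (counts[k], -PRIORITY[k]) > (counts[best], -PRIORITY[best]):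
--             best = k
--     return best if best is not None else 'default'
-- ===== Notes on version B (the rewrite author's own statement) =====
-- stated objective: alternative
-- what changed: B replaces A's staged pipeline (collect methods list, build a Counter, take most_common, build the tied list, scan the priority order) with a single streaming pass over the structures that maintains running counts and the current winner online, promoting a key only when its (count, -priority) pair strictly beats the holder's.
import Mathlib
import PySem

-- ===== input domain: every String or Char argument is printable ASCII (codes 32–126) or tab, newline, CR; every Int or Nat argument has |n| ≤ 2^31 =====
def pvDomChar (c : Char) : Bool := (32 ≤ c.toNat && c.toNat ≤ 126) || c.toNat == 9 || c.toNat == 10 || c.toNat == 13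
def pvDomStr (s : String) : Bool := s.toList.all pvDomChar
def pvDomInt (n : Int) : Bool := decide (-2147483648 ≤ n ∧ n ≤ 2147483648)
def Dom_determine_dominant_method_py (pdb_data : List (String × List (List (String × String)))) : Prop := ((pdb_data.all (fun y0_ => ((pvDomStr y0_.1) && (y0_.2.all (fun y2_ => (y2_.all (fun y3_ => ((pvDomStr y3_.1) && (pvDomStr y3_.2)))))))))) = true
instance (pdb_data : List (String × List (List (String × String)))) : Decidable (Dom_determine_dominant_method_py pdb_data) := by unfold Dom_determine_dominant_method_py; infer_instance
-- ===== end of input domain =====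

-- B replaces A's staged pipeline (collect methods, Counter, most_common, tied list, priority scan)
-- with ONE streaming pass keeping running counts and the current winner online (objective: alternative).

-- ===== PORT A =====
-- module-level METHOD_MAPPING dict (shared by both Pythons)
def pyMETHOD_MAPPING : PySem.Dict String String := PySem.Dict.mk
  [("x-ray", "xray"), ("xray", "xray"), ("x-ray crystallography", "xray"),
   ("cryo-em", "cryoem"), ("cryoem", "cryoem"), ("electron cryomicroscopy", "cryoem"),
   ("nmr", "nmr"), ("nuclear magnetic resonance", "nmr"),
   ("alphafold", "alphafold"), ("alphafold2", "alphafold"), ("af2", "alphafold"),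
   ("model", "alphafold"), (" homology", "alphafold")]

-- module-level helper normalize_method (shared by both Pythons)
def pyNormalizeMethod (method : String) : String :=
  if method == "" then "default"
  else pyMETHOD_MAPPING.getD (PySem.Str.strip (PySem.Str.lower method)) "default"

def pyPriorityOrder : List String := ["xray", "cryoem", "nmr", "alphafold", "default"]

def determine_dominant_method_py (pdb_data : List (String × List (List (String × String)))) : String :=
  let structures := (PySem.Dict.mk pdb_data).getD "structures" []
  if structures = [] then "default"
  else
    let methods := structures.foldl (fun acc struct =>
      let method := (PySem.Dict.mk struct).getD "experimental_method" ""
      if method ≠ "" then acc ++ [pyNormalizeMethod method] else acc) []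
    if methods = [] then "default"
    else
      let method_counts := PySem.Dict.counter methods
      -- most_common(1)[0][0]: the first key attaining the maximal count
      let most_common := match PySem.List.max? method_counts.items (fun kv => kv.2) with
        | some kv => kv.1
        | none => "default"
      let max_count := method_counts.getD most_common 0
      let tied_methods := (method_counts.items.filter (fun kv => kv.2 == max_count)).map (·.1)
      match pyPriorityOrder.find? (fun p => tied_methods.contains p) with
      | some p => p
      | none => most_common

-- ===== PORT B =====
-- module-level PRIORITY dict of Source B
def pyPRIORITY : PySem.Dict String Int := PySem.Dict.mk
  [("xray", 0), ("cryoem", 1), ("nmr", 2), ("alphafold", 3), ("default", 4)]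

def determine_dominant_method_py_alt (pdb_data : List (String × List (List (String × String)))) : String :=
  let structures := (PySem.Dict.mk pdb_data).getD "structures" []
  if structures = [] then "default"
  else
    let st := structures.foldl (fun (acc : PySem.Dict String Int × Option String) struct =>
      let raw := (PySem.Dict.mk struct).getD "experimental_method" ""
      if raw = "" then acc
      else
        let k := pyNormalizeMethod raw
        let counts := acc.1.insert k (acc.1.getD k 0 + 1)
        let best := match acc.2 with
          | none => some k
          | some b =>
            -- Python tuple comparison (counts[k], -PRIORITY[k]) > (counts[best], -PRIORITY[best])
            if counts.getD k 0 > counts.getD b 0 ∨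
               (counts.getD k 0 = counts.getD b 0 ∧ pyPRIORITY.getD k 0 < pyPRIORITY.getD b 0)
            then some k else some b
        (counts, best)) (PySem.Dict.empty, none)
    match st.2 with
    | some b => b
    | none => "default"

-- ===== PRECONDITION & SPEC =====
def Spec_determine_dominant_method_py (pdb_data : List (String × List (List (String × String)))) (out : String) : Prop := out = determine_dominant_method_py_alt pdb_data
instance (pdb_data : List (String × List (List (String × String)))) (out : String) : Decidable (Spec_determine_dominant_method_py pdb_data out) := by unfold Spec_determine_dominant_method_py; infer_instance

-- ===== CLAIM (what is proved, stated in full; the proofs are below) =====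
def Claim_equal_determine_dominant_method_py : Prop := ∀ (pdb_data : List (String × List (List (String × String)))), Dom_determine_dominant_method_py pdb_data → Spec_determine_dominant_method_py pdb_data (determine_dominant_method_py pdb_data)

-- ===== LEMMAS AND PROOFS =====

-- a getD over a literal association list returns the default or one of the stored values
lemma getD_mem_values (l : List (String × String)) (x d : String) :
    (PySem.Dict.mk l).getD x d ∈ d :: l.map (·.2) := by
  induction l with
  | nil => simp [PySem.Dict.getD_eq_get?_getD, PySem.Dict.get?]
  | cons p t ih =>
    rw [PySem.Dict.getD_eq_get?_getD, PySem.Dict.get?_mk_cons]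
    by_cases h : (p.1 == x) = true
    · simp [h]
    · rw [if_neg h, ← PySem.Dict.getD_eq_get?_getD]
      rcases List.mem_cons.mp ih with h1 | h1
      · exact List.mem_cons.mpr (.inl h1)
      · simp [h1]

-- normalize_method always returns one of the five priority keys
lemma pyNormalizeMethod_mem (method : String) : pyNormalizeMethod method ∈ pyPriorityOrder := by
  unfold pyNormalizeMethod
  split
  · simp [pyPriorityOrder]
  · have h := getD_mem_values pyMETHOD_MAPPING.items (PySem.Str.strip (PySem.Str.lower method)) "default"
    simp only [pyMETHOD_MAPPING, List.map, List.mem_cons, List.mem_nil_iff, or_false] at h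
    rcases h with h|h|h|h|h|h|h|h|h|h|h|h|h|h <;> simp [pyMETHOD_MAPPING, pyPriorityOrder, h]

-- PRIORITY[k] is the index of k in the priority list, for the five keys
lemma pyPRIORITY_getD (k : String) (hk : k ∈ pyPriorityOrder) :
    pyPRIORITY.getD k 0 = (pyPriorityOrder.idxOf k : Int) := by
  fin_cases hk <;> decide

-- A's append-if loop builds the filter+map methods list
lemma methods_eq (structures : List (List (String × String))) (acc : List String) :
    structures.foldl (fun acc struct =>
      let method := (PySem.Dict.mk struct).getD "experimental_method" ""
      if method ≠ "" then acc ++ [pyNormalizeMethod method] else acc) acc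
    = acc ++ (structures.filter
        (fun s => (PySem.Dict.mk s).getD "experimental_method" "" ≠ "")).map
        (fun s => pyNormalizeMethod ((PySem.Dict.mk s).getD "experimental_method" "")) := by
  induction structures generalizing acc with
  | nil => simp
  | cons s t ih =>
    simp only [List.foldl_cons]
    by_cases h : (PySem.Dict.mk s).getD "experimental_method" "" ≠ ""
    · rw [if_pos h, ih, List.filter_cons, if_pos (by simpa using h)]
      simp
    · rw [if_neg h, ih, List.filter_cons, if_neg (by simpa using h)]

-- the step of B's streaming loop, on an already-normalized method
def streamStep (acc : PySem.Dict String Int × Option String) (k : String) :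
    PySem.Dict String Int × Option String :=
  let counts := acc.1.insert k (acc.1.getD k 0 + 1)
  let best := match acc.2 with
    | none => some k
    | some b =>
      if counts.getD k 0 > counts.getD b 0 ∨
         (counts.getD k 0 = counts.getD b 0 ∧ pyPRIORITY.getD k 0 < pyPRIORITY.getD b 0)
      then some k else some b
  (counts, best)

-- B's loop over structures is the streamStep fold over the collected methods list
lemma stream_structs (structures : List (List (String × String)))
    (st : PySem.Dict String Int × Option String) :
    structures.foldl (fun (acc : PySem.Dict String Int × Option String) struct =>
      let raw := (PySem.Dict.mk struct).getD "experimental_method" ""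
      if raw = "" then acc
      else
        let k := pyNormalizeMethod raw
        let counts := acc.1.insert k (acc.1.getD k 0 + 1)
        let best := match acc.2 with
          | none => some k
          | some b =>
            if counts.getD k 0 > counts.getD b 0 ∨
               (counts.getD k 0 = counts.getD b 0 ∧ pyPRIORITY.getD k 0 < pyPRIORITY.getD b 0)
            then some k else some b
        (counts, best)) st
    = ((structures.filter
        (fun s => (PySem.Dict.mk s).getD "experimental_method" "" ≠ "")).map
        (fun s => pyNormalizeMethod ((PySem.Dict.mk s).getD "experimental_method" ""))).foldl
        streamStep st := by
  induction structures generalizing st with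
  | nil => simp
  | cons s t ih =>
    simp only [List.foldl_cons, List.filter_cons]
    by_cases h : (PySem.Dict.mk s).getD "experimental_method" "" = ""
    · rw [if_pos h, if_neg (by simpa using h)]
      exact ih st
    · rw [if_neg h, if_pos (by simpa using h)]
      simp only [List.map_cons, List.foldl_cons]
      exact ih _

-- the winner part of the streaming invariant
def BestOf (m : List String) (o : Option String) : Prop :=
  match o with
  | none => m = []
  | some b => b ∈ m ∧ b ∈ pyPriorityOrder ∧
      ∀ q : String, m.count q < m.count b ∨
        (m.count q = m.count b ∧ pyPriorityOrder.idxOf b ≤ pyPriorityOrder.idxOf q)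

-- invariant of the streaming loop: counts are exact; best is the max-count key of earliest priority
def pvInv (m : List String) (st : PySem.Dict String Int × Option String) : Prop :=
  (∀ q : String, st.1.getD q 0 = (m.count q : Int)) ∧ BestOf m st.2

lemma step_inv (m : List String) (k : String) (hk : k ∈ pyPriorityOrder)
    (st : PySem.Dict String Int × Option String) (h : pvInv m st) :
    pvInv (m ++ [k]) (streamStep st k) := by
  obtain ⟨hc, hb⟩ := h
  have e1 : (m ++ [k]).count k = m.count k + 1 := by
    simp [List.count_append]
  have e2 : ∀ q : String, q ≠ k → (m ++ [k]).count q = m.count q := by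
    intro q hq
    simp [List.count_append, Ne.symm hq]
  have hc' : ∀ q : String,
      (st.1.insert k (st.1.getD k 0 + 1)).getD q 0 = ((m ++ [k]).count q : Int) := by
    intro q
    rw [PySem.Dict.getD_insert]
    by_cases hq : q = k
    · subst hq; rw [if_pos rfl, hc, e1]; push_cast; ring
    · rw [if_neg hq, hc, e2 q hq]
  refine ⟨hc', ?_⟩
  cases hst : st.2 with
  | none =>
    rw [hst] at hb
    have hm : m = [] := hb
    subst hm
    have hred : (streamStep st k).2 = some k := by
      simp [streamStep, hst]
    rw [hred]
    refine ⟨by simp, hk, ?_⟩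
    intro q
    by_cases hq : q = k
    · subst hq; right; exact ⟨rfl, le_refl _⟩
    · left
      rw [e2 q hq, e1]
      simp
  | some b =>
    rw [hst] at hb
    obtain ⟨hbm, hb5, hdom⟩ := hb
    have hred : (streamStep st k).2 =
        if ((m ++ [k]).count k : Int) > ((m ++ [k]).count b : Int) ∨
           (((m ++ [k]).count k : Int) = ((m ++ [k]).count b : Int) ∧
             (pyPriorityOrder.idxOf k : Int) < (pyPriorityOrder.idxOf b : Int))
        then some k else some b := by
      simp only [streamStep, hst]
      rw [hc' k, hc' b, pyPRIORITY_getD k hk, pyPRIORITY_getD b hb5]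
    rw [hred]
    by_cases hbk : b = k
    · subst hbk
      rw [if_neg (by omega)]
      refine ⟨by simp, hk, ?_⟩
      intro q
      by_cases hq : q = b
      · subst hq; right; exact ⟨rfl, le_refl _⟩
      · left
        rw [e2 q hq, e1]
        rcases hdom q with h1 | ⟨h1, _⟩ <;> omega
    · have e2b : (m ++ [k]).count b = m.count b := e2 b hbk
      rw [e1, e2b]
      split_ifs with hcond
      · refine ⟨by simp, hk, ?_⟩
        intro q
        by_cases hq : q = k
        · subst hq; right; exact ⟨rfl, le_refl _⟩
        · rw [e2 q hq, e1]
          rcases hdom q with h1 | ⟨h1, h2⟩ <;> rcases hcond with h3 | ⟨h3, h4⟩ <;> omega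
      · refine ⟨by simp [hbm], hb5, ?_⟩
        intro q
        rw [e2b]
        by_cases hq : q = k
        · subst hq
          rw [e1]
          omega
        · rw [e2 q hq]
          exact hdom q

lemma stream_inv (l : List String) (hl : ∀ x ∈ l, x ∈ pyPriorityOrder) :
    ∀ (ms : List String) (st : PySem.Dict String Int × Option String),
      pvInv ms st → pvInv (ms ++ l) (l.foldl streamStep st) := by
  induction l with
  | nil => intro ms st h; simpa using h
  | cons k t ih =>
    intro ms st h
    have h1 := step_inv ms k (hl k (by simp)) st h
    have h2 := ih (fun x hx => hl x (by simp [hx])) (ms ++ [k]) _ h1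
    simpa [List.append_assoc] using h2

lemma inv_init : pvInv [] (PySem.Dict.empty, none) := by
  refine ⟨?_, rfl⟩
  intro q
  simp [PySem.Dict.getD_empty]

-- find? on a nodup list returns the earliest-index element satisfying the predicate
lemma find?_first (p : String → Bool) : ∀ (l : List String), l.Nodup → ∀ b, b ∈ l → p b = true →
    (∀ q ∈ l, p q = true → l.idxOf b ≤ l.idxOf q) → l.find? p = some b := by
  intro l
  induction l with
  | nil => simp
  | cons x t ih =>
    intro hnd b hb hpb hmin
    by_cases hx : p x = true
    · by_cases hbx : b = x
      · subst hbx; simp [hx]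
      · have h0 := hmin x (by simp) hx
        rw [List.idxOf_cons_self] at h0
        rw [List.idxOf_cons_ne t (fun e => hbx e.symm)] at h0
        omega
    · have hbx : b ≠ x := fun h => hx (h ▸ hpb)
      have hbt : b ∈ t := (List.mem_cons.mp hb).resolve_left hbx
      rw [List.find?_cons_of_neg (by simpa using hx)]
      refine ih (List.nodup_cons.mp hnd).2 b hbt hpb ?_
      intro q hq hpq
      have hqx : q ≠ x := fun e => (List.nodup_cons.mp hnd).1 (e ▸ hq)
      have hm := hmin q (by simp [hq]) hpq
      rw [List.idxOf_cons_ne t (fun e => hbx e.symm),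
          List.idxOf_cons_ne t (fun e => hqx e.symm)] at hm
      omega

-- A's post-processing (counter → most_common → tied list → priority scan) picks exactly
-- the max-count key of earliest priority
lemma core' (m : List String) (hmem : ∀ x ∈ m, x ∈ pyPriorityOrder)
    (b : String) (hb5 : b ∈ pyPriorityOrder) (hbm : b ∈ m)
    (hdom : ∀ q : String, m.count q < m.count b ∨
      (m.count q = m.count b ∧ pyPriorityOrder.idxOf b ≤ pyPriorityOrder.idxOf q)) :
    (let method_counts := PySem.Dict.counter m
     let most_common := match PySem.List.max? method_counts.items (fun kv => kv.2) with
       | some kv => kv.1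
       | none => "default"
     let max_count := method_counts.getD most_common 0
     let tied_methods := (method_counts.items.filter (fun kv => kv.2 == max_count)).map (·.1)
     match pyPriorityOrder.find? (fun p => tied_methods.contains p) with
     | some p => p
     | none => most_common) = b := by
  have hne : m ≠ [] := List.ne_nil_of_mem hbm
  have hofne : PySem.Set.ofList m ≠ [] := by
    cases m with
    | nil => exact absurd rfl hne
    | cons x t =>
      intro h
      have hx : x ∈ PySem.Set.ofList (x :: t) := (PySem.Set.mem_ofList _ _).mpr (by simp)
      rw [h] at hx
      simp at hx
  have hitems : (PySem.Dict.counter m).items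
      = (PySem.Set.ofList m).map (fun k => (k, (m.count k : Int))) :=
    PySem.Dict.items_counter m
  cases hmax : PySem.List.max? (PySem.Dict.counter m).items (fun kv => kv.2) with
  | none =>
    rw [PySem.List.max?_eq_none_iff, hitems] at hmax
    simp at hmax
    exact absurd hmax hofne
  | some kv =>
    simp only [hmax]
    have hkvmem : kv ∈ (PySem.Dict.counter m).items := PySem.List.max?_mem hmax
    have hismax := PySem.List.max?_isMax hmax
    rw [hitems] at hkvmem
    obtain ⟨k0, hk0, hkv⟩ := List.mem_map.mp hkvmem
    have hkv1 : kv.1 = k0 := by rw [← hkv]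
    have hkv2 : kv.2 = (m.count k0 : Int) := by rw [← hkv]
    have hk0m : kv.1 ∈ m := by
      rw [hkv1]
      exact (PySem.Set.mem_ofList _ _).mp hk0
    have hgd : (PySem.Dict.counter m).getD kv.1 0 = (m.count kv.1 : Int) :=
      PySem.Dict.getD_counter m kv.1
    set N := m.count kv.1 with hNdef
    have hNint : kv.2 = (N : Int) := by rw [hkv2, hNdef, hkv1]
    have hle : ∀ p : String, m.count p ≤ N := by
      intro p
      by_cases hp : p ∈ m
      · have h1 : ((m.count p : Int)) ≤ kv.2 :=
          hismax (p, (m.count p : Int))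
            (by rw [hitems]
                exact List.mem_map.mpr ⟨p, (PySem.Set.mem_ofList _ _).mpr hp, rfl⟩)
        rw [hNint] at h1
        exact_mod_cast h1
      · simp [List.count_eq_zero.mpr hp]
    have hbN : m.count b = N := by
      have h1 := hle b
      rcases hdom kv.1 with h2 | ⟨h2, _⟩ <;> omega
    simp only [hitems, hgd]
    have hpred : ∀ p : String,
        ((((PySem.Set.ofList m).map (fun k => (k, (m.count k : Int)))).filter
            (fun kv' => kv'.2 == (N : Int))).map (·.1)).contains p
          = decide (m.count p = N) := by
      intro p
      by_cases hc : m.count p = N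
      · have hNpos : 0 < N := by
          have := List.count_pos_iff.mpr hk0m
          omega
        have hpm : p ∈ m := List.count_pos_iff.mp (by omega)
        have hmem' : p ∈ (((PySem.Set.ofList m).map (fun k => (k, (m.count k : Int)))).filter
            (fun kv' => kv'.2 == (N : Int))).map (·.1) :=
          List.mem_map.mpr ⟨(p, (m.count p : Int)),
            List.mem_filter.mpr ⟨List.mem_map.mpr ⟨p, (PySem.Set.mem_ofList _ _).mpr hpm, rfl⟩,
              by simp [hc]⟩, rfl⟩
        simp [hc, hmem']
      · have hnmem : p ∉ (((PySem.Set.ofList m).map (fun k => (k, (m.count k : Int)))).filter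
            (fun kv' => kv'.2 == (N : Int))).map (·.1) := by
          intro hmm
          obtain ⟨kv', hkv', hfst⟩ := List.mem_map.mp hmm
          have h2 := List.mem_filter.mp hkv'
          obtain ⟨k', hk', hkeq⟩ := List.mem_map.mp h2.1
          have h3 := h2.2
          rw [← hkeq] at h3 hfst
          simp at h3 hfst
          rw [hfst] at h3
          exact hc (by exact_mod_cast h3)
        simp [hc, hnmem]
    simp only [hpred]
    have hfind : pyPriorityOrder.find? (fun p => decide (m.count p = N)) = some b := by
      refine find?_first _ pyPriorityOrder (by decide) b hb5 (by simp [hbN]) ?_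
      intro q hq hpq
      have hqN : m.count q = N := by simpa using hpq
      rcases hdom q with h1 | ⟨_, h2⟩
      · omega
      · exact h2
    rw [hfind]

-- ===== VERDICT (by name: the statement is the Claim_ definition above) =====
theorem determine_dominant_method_py_spec : Claim_equal_determine_dominant_method_py := by
  intro pdb _
  show determine_dominant_method_py pdb = determine_dominant_method_py_alt pdb
  unfold determine_dominant_method_py determine_dominant_method_py_alt
  simp only [methods_eq, stream_structs, List.nil_append]
  by_cases h1 : (PySem.Dict.mk pdb).getD "structures" [] = []
  · simp [h1]
  · rw [if_neg h1, if_neg h1]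
    set m := (((PySem.Dict.mk pdb).getD "structures" []).filter
        (fun s => (PySem.Dict.mk s).getD "experimental_method" "" ≠ "")).map
        (fun s => pyNormalizeMethod ((PySem.Dict.mk s).getD "experimental_method" "")) with hm
    have hmem : ∀ x ∈ m, x ∈ pyPriorityOrder := by
      intro x hx
      obtain ⟨s, _, rfl⟩ := List.mem_map.mp hx
      exact pyNormalizeMethod_mem _
    have hInv : pvInv m (m.foldl streamStep (PySem.Dict.empty, none)) := by
      have := stream_inv m hmem [] (PySem.Dict.empty, none) inv_init
      simpa using this
    cases hfin : (m.foldl streamStep (PySem.Dict.empty, none)).2 with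
    | none =>
      have hmnil : m = [] := by
        have := hInv.2
        rw [hfin] at this
        exact this
      simp [hmnil]
    | some b =>
      have hprops : BestOf m (some b) := by
        have := hInv.2
        rw [hfin] at this
        exact this
      obtain ⟨hbm, hb5, hdom⟩ := hprops
      have hne : m ≠ [] := List.ne_nil_of_mem hbm
      rw [if_neg hne]
      exact core' m hmem b hb5 hbm hdom
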